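-- pv_equiv track=rewrite | github.com/KwonTaeyong/Python_v7 | learning89.py | solution
-- ===== SOURCE A (Python) =====
-- import bisect
--
-- def solution(land, P, Q):
--     arr = []
--     for row in land:
--         arr.extend(row)
--     arr.sort()
--     n = len(arr)
--
--     # prefix sum
--     prefix = [0] * (n+1)
--     for i in range(n):
--         prefix[i+1] = prefix[i] + arr[i]
--
--     def cost(h):
--         # arr에서 h 이하인 원소 개수 = idx
--         idx = bisect.bisect_left(arr, h)
--
--         # h보다 작은 쪽 → 블록 추가
--         left_count = idx
--         left_sum = prefix[idx]
--         add_blocks = h * left_count - left_sum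
--
--         # h 이상인 쪽 → 블록 제거
--         right_count = n - idx
--         right_sum = prefix[n] - left_sum
--         remove_blocks = right_sum - h * right_count
--
--         return add_blocks * P + remove_blocks * Q
--
--     # 후보 높이는 arr 안의 값들만 보면 충분
--     answer = float("inf")
--     for h in set(arr):   # 중복 제거
--         answer = min(answer, cost(h))
--
--     return answer
-- ===== SOURCE B (Python) =====
-- def solution(land, P, Q):
--     # Per-candidate direct cost: no sort, no prefix table, no bisect.
--     arr = [x for row in land for x in row]
--     if not arr:
--         return float("inf")
--     best = None
--     for h in set(arr):
--         add_blocks = sum(h - x for x in arr if x < h)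
--         remove_blocks = sum(x - h for x in arr if x > h)
--         c = add_blocks * P + remove_blocks * Q
--         if best is None or c < best:
--             best = c
--     return best
-- ===== Notes on version B (the rewrite author's own statement) =====
-- stated objective: simpler
-- what changed: B drops A's sort, prefix-sum table and per-candidate bisect and instead computes each candidate height's cost by a direct scan of the unsorted values (sum of deficits below h and surpluses above h).
-- outside the precondition, e.g. on solution([], 1, 1): A returns inf, B returns inf
import Mathlib
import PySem

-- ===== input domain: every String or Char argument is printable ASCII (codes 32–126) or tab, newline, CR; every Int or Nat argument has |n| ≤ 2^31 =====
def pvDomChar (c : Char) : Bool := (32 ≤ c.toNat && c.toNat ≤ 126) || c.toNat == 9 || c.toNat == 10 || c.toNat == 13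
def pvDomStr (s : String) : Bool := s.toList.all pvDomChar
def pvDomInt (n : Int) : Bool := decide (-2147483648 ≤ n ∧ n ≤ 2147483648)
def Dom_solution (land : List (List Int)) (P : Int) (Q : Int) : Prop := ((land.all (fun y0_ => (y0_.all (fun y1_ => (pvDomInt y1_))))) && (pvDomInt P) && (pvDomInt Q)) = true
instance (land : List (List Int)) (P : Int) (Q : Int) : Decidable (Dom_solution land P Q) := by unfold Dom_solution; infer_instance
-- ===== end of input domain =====

-- B replaces A's sort + prefix-sum table + per-candidate bisect by a direct per-candidate
-- scan of the unsorted values (simpler: no sort, no table, no bisect).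

-- ===== PORT A =====
-- cost(h): prefix[idx] and prefix[n] are nonnegative in-range indices, so List.getD is exact here
def costA (arrS pref : List Int) (P Q h : Int) : Int :=
  let idx := PySem.List.bisectLeft arrS h
  let leftCount : Int := (idx : Int)
  let leftSum := pref.getD idx 0
  let addBlocks := h * leftCount - leftSum
  let rightCount : Int := (arrS.length : Int) - (idx : Int)
  let rightSum := pref.getD arrS.length 0 - leftSum
  let removeBlocks := rightSum - h * rightCount
  addBlocks * P + removeBlocks * Q

def solution (land : List (List Int)) (P : Int) (Q : Int) : Int :=
  let arr := land.foldl (fun acc row => acc ++ row) ([] : List Int)   -- arr.extend(row)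
  let arrS := PySem.List.sorted arr (fun x => x) false                 -- arr.sort()
  let n := arrS.length
  -- prefix = [0]*(n+1); for i in range(n): prefix[i+1] = prefix[i] + arr[i]
  let pref := (List.range n).foldl
      (fun p i => p.set (i+1) (p.getD i 0 + arrS.getD i 0)) (List.replicate (n+1) 0)
  -- answer = float("inf"); for h in set(arr): answer = min(answer, cost(h))   (none = inf)
  match (PySem.Set.ofList arrS).foldl (fun acc h =>
      match acc with
      | none => some (costA arrS pref P Q h)
      | some a => some (min a (costA arrS pref P Q h))) none with
  | some v => v
  | none => 0   -- empty grid: Python A returns float('inf'), excluded by Pre_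

-- ===== PORT B =====
def costB (arr : List Int) (P Q h : Int) : Int :=
  let addBlocks := ((arr.filter (fun x => decide (x < h))).map (fun x => h - x)).sum
  let removeBlocks := ((arr.filter (fun x => decide (h < x))).map (fun x => x - h)).sum
  addBlocks * P + removeBlocks * Q

def solution_alt (land : List (List Int)) (P : Int) (Q : Int) : Int :=
  let arr := land.flatMap (fun row => row)
  match (PySem.Set.ofList arr).foldl (fun best h =>
      let c := costB arr P Q h
      match best with
      | none => some c
      | some b => some (if c < b then c else b)) none with
  | some v => v
  | none => 0   -- empty grid: Python B returns float('inf'), excluded by Pre_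

-- ===== PRECONDITION & SPEC =====
-- Pre_ excludes the empty grid (no cells at all): there Python A returns float('inf'),
-- which is not a value of the declared Int type (Python B returns the same float('inf')).
def Pre_solution (land : List (List Int)) (P : Int) (Q : Int) : Prop := land.flatten ≠ []
instance (land : List (List Int)) (P : Int) (Q : Int) : Decidable (Pre_solution land P Q) := by unfold Pre_solution; infer_instance
def pvWitness_solution : List (List Int) × Int × Int := ([[1, 2], [3]], 1, 2)

def Spec_solution (land : List (List Int)) (P : Int) (Q : Int) (out : Int) : Prop := out = solution_alt land P Q
instance (land : List (List Int)) (P : Int) (Q : Int) (out : Int) : Decidable (Spec_solution land P Q out) := by unfold Spec_solution; infer_instance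

-- ===== CLAIM (what is proved, stated in full; the proofs are below) =====
def Claim_equal_solution : Prop := ∀ (land : List (List Int)) (P : Int) (Q : Int), Dom_solution land P Q → Pre_solution land P Q → Spec_solution land P Q (solution land P Q)

-- ===== LEMMAS AND PROOFS =====


theorem filter_eq_take_of_split (s : List Int) (p : Int → Bool) (idx : Nat)
    (hle : idx ≤ s.length)
    (h1 : ∀ (j : Nat) (hj : j < s.length), j < idx → p s[j])
    (h2 : ∀ (j : Nat) (hj : j < s.length), idx ≤ j → ¬ p s[j]) :
    s.filter p = s.take idx := by
  induction s generalizing idx with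
  | nil => simp
  | cons a t ih =>
    cases idx with
    | zero =>
      simp only [List.take_zero]
      apply List.filter_eq_nil_iff.mpr
      intro x hx
      obtain ⟨j, hj, rfl⟩ := List.mem_iff_getElem.mp hx
      exact h2 j hj (Nat.zero_le j)
    | succ i =>
      have hpa : p a := h1 0 (by simp) (Nat.succ_pos i)
      rw [List.filter_cons_of_pos hpa, List.take_succ_cons]
      congr 1
      apply ih i (by simpa using hle)
      · intro j hj hji
        have := h1 (j+1) (by simpa using Nat.succ_lt_succ hj) (Nat.succ_lt_succ hji)
        simpa using this
      · intro j hj hij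
        have := h2 (j+1) (by simpa using Nat.succ_lt_succ hj) (Nat.succ_le_succ hij)
        simpa using this

theorem prefix_fold_inv (s : List Int) (m : Nat) (hm : m ≤ s.length) :
    (List.range m).foldl
      (fun p i => p.set (i+1) (p.getD i 0 + s.getD i 0)) (List.replicate (s.length+1) 0)
    = (List.range (m+1)).map (fun j => (s.take j).sum) ++ List.replicate (s.length - m) 0 := by
  induction m with
  | zero => simp [List.replicate_succ]
  | succ m ih =>
    have hm' : m ≤ s.length := Nat.le_of_succ_le hm
    have hmlt : m < s.length := hm
    rw [List.range_succ, List.foldl_append, ih hm']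
    simp only [List.foldl_cons, List.foldl_nil]
    have hlenA : ((List.range (m+1)).map (fun j => (s.take j).sum)).length = m + 1 := by simp
    have hget : ((List.range (m+1)).map (fun j => (s.take j).sum) ++ List.replicate (s.length - m) 0).getD m 0
        = (s.take m).sum := by
      rw [List.getD_append _ _ _ m (by simp)]
      rw [List.getD_eq_getElem _ _ (by simp)]
      simp
    rw [hget]
    have hsget : s.getD m 0 = s[m] := List.getD_eq_getElem s 0 hmlt
    rw [hsget]
    rw [List.set_append]
    rw [if_neg (by simp)]
    have hrep : s.length - m = (s.length - (m+1)) + 1 := by omega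
    rw [hrep, List.replicate_succ]
    simp only [hlenA, Nat.sub_self, List.set_cons_zero]
    rw [List.range_succ (n := m+1), List.map_append]
    rw [List.append_assoc]
    congr 2
    simp [List.sum_take_succ s m hmlt]

theorem prefix_fold_eq (s : List Int) :
    (List.range s.length).foldl
      (fun p i => p.set (i+1) (p.getD i 0 + s.getD i 0)) (List.replicate (s.length+1) 0)
    = (List.range (s.length+1)).map (fun j => (s.take j).sum) := by
  simpa using prefix_fold_inv s s.length le_rfl

theorem sum_map_const_sub (l : List Int) (h : Int) :
    (l.map (fun x => h - x)).sum = h * (l.length : Int) - l.sum := by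
  induction l with
  | nil => simp
  | cons a t ih => simp [ih]; ring

theorem sum_map_sub_const (l : List Int) (h : Int) :
    (l.map (fun x => x - h)).sum = l.sum - h * (l.length : Int) := by
  induction l with
  | nil => simp
  | cons a t ih => simp [ih]; ring

theorem sum_gt_eq_sum_ge (l : List Int) (h : Int) :
    ((l.filter (fun x => !decide (x < h))).map (fun x => x - h)).sum
    = ((l.filter (fun x => decide (h < x))).map (fun x => x - h)).sum := by
  induction l with
  | nil => rfl
  | cons a t ih =>
    rcases lt_trichotomy a h with hlt | heq | hgt
    · rw [List.filter_cons_of_neg (by simp [hlt]), List.filter_cons_of_neg (by simp; omega), ih]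
    · subst heq
      rw [List.filter_cons_of_pos (by simp), List.filter_cons_of_neg (by simp)]
      simp [ih]
    · rw [List.filter_cons_of_pos (by simp; omega), List.filter_cons_of_pos (by simp [hgt])]
      simp [ih]

def minStep (acc : Option Int) (c : Int) : Option Int :=
  some (acc.elim c (fun a => min a c))

theorem minStep_comm (acc : Option Int) (a b : Int) :
    minStep (minStep acc a) b = minStep (minStep acc b) a := by
  cases acc <;> simp [minStep, min_assoc, min_comm a b]

-- the two cost functions agree on every candidate height
theorem cost_eq (arr : List Int) (P Q h : Int) :
    costA (PySem.List.sorted arr (fun x => x) false)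
      ((List.range (PySem.List.sorted arr (fun x => x) false).length).foldl
        (fun p i => p.set (i+1) (p.getD i 0 + (PySem.List.sorted arr (fun x => x) false).getD i 0))
        (List.replicate ((PySem.List.sorted arr (fun x => x) false).length+1) 0)) P Q h
    = costB arr P Q h := by
  have hpw : List.Pairwise (fun a b : Int => a ≤ b) (PySem.List.sorted arr (fun x => x) false) := by
    simpa using PySem.List.sorted_pairwise arr (fun x => x)
  obtain ⟨hle, hlt, hge⟩ := PySem.List.bisectLeft_spec (PySem.List.sorted arr (fun x => x) false) h hpw
  set s := PySem.List.sorted arr (fun x => x) false with hs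
  set idx := PySem.List.bisectLeft s h with hidx
  have hperm : s.Perm arr := PySem.List.sorted_perm arr (fun x => x) false
  have hfil : s.filter (fun x => decide (x < h)) = s.take idx :=
    filter_eq_take_of_split s _ idx hle
      (fun j hj hji => by simpa using hlt j hj hji)
      (fun j hj hij => by simpa using not_lt.mpr (hge j hj hij))
  have hlenf : (arr.filter (fun x => decide (x < h))).length = idx := by
    rw [← (hperm.filter _).length_eq, hfil, List.length_take]; omega
  have htakesum : (s.take idx).sum = (arr.filter (fun x => decide (x < h))).sum := by
    rw [← hfil]; exact ((hperm.filter _).sum_eq)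
  have hpart := List.filter_append_perm (fun x => decide (x < h)) arr
  have hsumNF : (arr.filter (fun x => !decide (x < h))).sum
      = arr.sum - (arr.filter (fun x => decide (x < h))).sum := by
    have := hpart.sum_eq; simp only [List.sum_append] at this; omega
  have hlenNF : ((arr.filter (fun x => !decide (x < h))).length : Int)
      = (arr.length : Int) - ((arr.filter (fun x => decide (x < h))).length : Int) := by
    have := hpart.length_eq; simp only [List.length_append] at this; push_cast [← this]; ring
  have hgetDidx : ((List.range (s.length+1)).map (fun j => (s.take j).sum)).getD idx 0
      = (s.take idx).sum := by
    rw [List.getD_eq_getElem _ _ (by simp; omega)]; simp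
  have hgetDn : ((List.range (s.length+1)).map (fun j => (s.take j).sum)).getD s.length 0
      = s.sum := by
    rw [List.getD_eq_getElem _ _ (by simp)]; simp
  have hcb : costB arr P Q h
      = (h * ((arr.filter (fun x => decide (x < h))).length : Int)
          - (arr.filter (fun x => decide (x < h))).sum) * P
        + ((arr.filter (fun x => !decide (x < h))).sum
          - h * ((arr.filter (fun x => !decide (x < h))).length : Int)) * Q := by
    simp only [costB]
    rw [← sum_gt_eq_sum_ge, sum_map_const_sub, sum_map_sub_const]
  have hca : costA s ((List.range (s.length+1)).map (fun j => (s.take j).sum)) P Q h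
      = (h * (idx : Int) - (s.take idx).sum) * P
        + ((s.sum - (s.take idx).sum) - h * ((s.length : Int) - (idx : Int))) * Q := by
    simp only [costA, ← hidx, hgetDidx, hgetDn]
  rw [prefix_fold_eq s, hca, hcb, htakesum, ← hlenf, hperm.sum_eq, hperm.length_eq,
    hsumNF, hlenNF]

-- min-fold over any rearrangement of the candidates gives the same value
theorem fold_minStep_perm (l1 l2 : List Int) (g : Int → Int) (hp : l1.Perm l2) :
    l1.foldl (fun acc x => minStep acc (g x)) none
    = l2.foldl (fun acc x => minStep acc (g x)) none :=
  List.Perm.foldl_eq (rcomm := ⟨fun acc a b => minStep_comm acc (g a) (g b)⟩) hp none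

-- ===== VERDICT (by name: the statement is the Claim_ definition above) =====
theorem solution_spec : Claim_equal_solution := by
  intro land P Q _ _
  unfold Spec_solution solution solution_alt
  have harr : land.foldl (fun acc row => acc ++ row) ([] : List Int) = land.flatten := by
    simpa using PySem.List.foldl_append_eq_flatten land []
  simp only [harr, List.flatMap_id']
  have hfold :
      (PySem.Set.ofList (PySem.List.sorted land.flatten (fun x => x) false)).foldl
        (fun acc h => match acc with
          | none => some (costA (PySem.List.sorted land.flatten (fun x => x) false)
              ((List.range (PySem.List.sorted land.flatten (fun x => x) false).length).foldl
                (fun p i => p.set (i+1) (p.getD i 0 + (PySem.List.sorted land.flatten (fun x => x) false).getD i 0))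
                (List.replicate ((PySem.List.sorted land.flatten (fun x => x) false).length+1) 0)) P Q h)
          | some a => some (min a (costA (PySem.List.sorted land.flatten (fun x => x) false)
              ((List.range (PySem.List.sorted land.flatten (fun x => x) false).length).foldl
                (fun p i => p.set (i+1) (p.getD i 0 + (PySem.List.sorted land.flatten (fun x => x) false).getD i 0))
                (List.replicate ((PySem.List.sorted land.flatten (fun x => x) false).length+1) 0)) P Q h))) none
      = (PySem.Set.ofList land.flatten).foldl
        (fun best h =>
          let c := costB land.flatten P Q h
          match best with
          | none => some c
          | some b => some (if c < b then c else b)) none := by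
    trans ((PySem.Set.ofList (PySem.List.sorted land.flatten (fun x => x) false)).foldl
        (fun acc x => minStep acc (costB land.flatten P Q x)) none)
    · exact PySem.List.foldl_congr_mem _ _ _ none
        (fun acc x _ => by cases acc <;> rw [cost_eq land.flatten P Q x] <;> rfl)
    trans ((PySem.Set.ofList land.flatten).foldl
        (fun acc x => minStep acc (costB land.flatten P Q x)) none)
    · exact fold_minStep_perm _ _ _
        ((List.perm_ext_iff_of_nodup (PySem.Set.nodup_ofList _) (PySem.Set.nodup_ofList _)).mpr
          (fun a => by simp [PySem.Set.mem_ofList, PySem.List.mem_sorted]))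
    · exact PySem.List.foldl_congr_mem _ _ _ none
        (fun acc x _ => by
          cases acc with
          | none => rfl
          | some b =>
            simp only [minStep, Option.elim, min_def, Option.some.injEq]
            split_ifs <;> omega)
  rw [hfold]
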